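-- pv_equiv track=rewrite | github.com/rhinstaller/fedup | fedup/media.py | systemd_escape
-- ===== SOURCE A (Python) =====
-- validchars='0123456789'\
--            'abcdefghijklmnopqrstuvwxyz'\
--            'ABCDEFGHIJKLMNOPQRSTUVWXYZ'\
--            ':-_.\\'
--
-- def systemd_escape_char(ch):
--     if ch == '/':
--         return '-'
--     elif ch == '-' or ch == '\\' or ch not in validchars:
--         return '\\x%x' % ord(ch)
--     else:
--         return ch
--
-- def systemd_escape(path):
--     if path == '/':
--         return '-'
--     newpath = ''
--     path = path.strip('/')
--     if path[0] == '.':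
--         newpath += '\\x2e'
--         path = path[1:]
--     for ch in path:
--         newpath += systemd_escape_char(ch)
--     return newpath
-- ===== SOURCE B (Python) =====
-- # B: split on '/' and join with '-', escaping each component by copying maximal
-- # runs of safe characters wholesale and hex-escaping the single char that ends a run.
-- _SAFE = frozenset('0123456789abcdefghijklmnopqrstuvwxyz'
--                   'ABCDEFGHIJKLMNOPQRSTUVWXYZ:._')
--
-- def _esc_component(s):
--     out = []
--     i, n = 0, len(s)
--     while i < n:
--         j = i
--         while j < n and s[j] in _SAFE:
--             j += 1
--         out.append(s[i:j])
--         if j < n: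
--             out.append('\\x%x' % ord(s[j]))
--             j += 1
--         i = j
--     return ''.join(out)
--
-- def systemd_escape(path):
--     if path == '/':
--         return '-'
--     path = path.strip('/')
--     head = ''
--     if path[0] == '.':
--         head, path = '\\x2e', path[1:]
--     return head + '-'.join(_esc_component(c) for c in path.split('/'))
-- ===== Notes on version B (the rewrite author's own statement) =====
-- stated objective: alternative
-- what changed: A's per-character loop with a conditional helper is replaced by splitting the stripped path at separator characters and joining the escaped components with dashes, each component escaped by copying maximal runs of safe characters wholesale and hex-escaping the single run-terminating character.
import Mathlib
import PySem

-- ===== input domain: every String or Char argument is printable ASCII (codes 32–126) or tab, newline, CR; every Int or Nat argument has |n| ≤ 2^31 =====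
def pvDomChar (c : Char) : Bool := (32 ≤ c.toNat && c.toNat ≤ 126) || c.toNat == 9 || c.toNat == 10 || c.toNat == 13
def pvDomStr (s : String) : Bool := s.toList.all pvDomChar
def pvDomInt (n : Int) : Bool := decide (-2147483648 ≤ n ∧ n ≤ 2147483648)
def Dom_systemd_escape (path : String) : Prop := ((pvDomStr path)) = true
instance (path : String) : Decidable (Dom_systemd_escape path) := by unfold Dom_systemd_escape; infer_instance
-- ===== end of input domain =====

-- B replaces A's per-character loop + conditional helper by splitting the stripped path
-- at separators and joining escaped components with dashes, copying safe runs wholesale.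

-- ===== PORT A =====
def pvValidchars : List Char :=
  "0123456789abcdefghijklmnopqrstuvwxyzABCDEFGHIJKLMNOPQRSTUVWXYZ:-_.\\".toList

def systemd_escape_char (ch : Char) : List Char :=
  if ch = '/' then ['-']
  else if ch = '-' ∨ ch = '\\' ∨ ¬ (pvValidchars.contains ch = true) then
    '\\' :: 'x' :: Nat.toDigits 16 ch.toNat      -- '\\x%x' % ord(ch)
  else [ch]

def systemd_escape (path : String) : String :=
  if path = "/" then "-"
  else
    let stripped := PySem.Chars.stripChars path.toList "/".toList
    match PySem.List.pyGet? stripped 0 with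
    | none => ""   -- Python raises IndexError here (path[0] on empty string); excluded by Pre_
    | some c0 =>
      let (newpath, rest) :=
        if c0 = '.' then (('\\' :: 'x' :: '2' :: 'e' :: []), PySem.List.slice stripped (some 1) none)
        else (([] : List Char), stripped)
      String.mk (rest.foldl (fun acc ch => acc ++ systemd_escape_char ch) newpath)

-- ===== PORT B =====
def pvSafe : List Char :=
  "0123456789abcdefghijklmnopqrstuvwxyzABCDEFGHIJKLMNOPQRSTUVWXYZ:._".toList

def pvHex (c : Char) : List Char := '\\' :: 'x' :: Nat.toDigits 16 c.toNat

-- the inner while loop of _esc_component: copy the maximal safe run, then escape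
-- the char that terminated it, and continue on the remainder
def escComponent (cs : List Char) : List Char :=
  let pre := cs.takeWhile (fun c => pvSafe.contains c)
  match h : cs.dropWhile (fun c => pvSafe.contains c) with
  | [] => pre
  | c :: rest => pre ++ pvHex c ++ escComponent rest
termination_by cs.length
decreasing_by
  have hle : (cs.dropWhile (fun c => pvSafe.contains c)).length ≤ cs.length :=
    List.length_dropWhile_le _ _
  rw [h] at hle; simp at hle; omega

-- path.split('/'): hand port, exact — Python's str.split with a one-char separator
def pySplitSep : List Char → List (List Char)
  | [] => [[]]
  | c :: cs =>
    if c = '/' then [] :: pySplitSep cs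
    else
      match pySplitSep cs with
      | [] => [[c]]          -- unreachable: pySplitSep never returns []
      | h :: t => (c :: h) :: t

def systemd_escape_alt (path : String) : String :=
  if path = "/" then "-"
  else
    let stripped := PySem.Chars.stripChars path.toList "/".toList
    match PySem.List.pyGet? stripped 0 with
    | none => ""   -- Python raises IndexError here too; excluded by Pre_
    | some c0 =>
      let (head, rest) :=
        if c0 = '.' then (('\\' :: 'x' :: '2' :: 'e' :: []), PySem.List.slice stripped (some 1) none)
        else (([] : List Char), stripped)
      String.mk (head ++ List.intercalate ['-'] ((pySplitSep rest).map escComponent))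

-- ===== PRECONDITION & SPEC =====
-- Pre_ excludes exactly the inputs whose slash-stripped form is empty while the input is
-- not the one-character root path: there path[0] raises IndexError in both A and B.
def Pre_systemd_escape (path : String) : Prop :=
  path = "/" ∨ PySem.Chars.stripChars path.toList "/".toList ≠ []
instance (path : String) : Decidable (Pre_systemd_escape path) := by
  unfold Pre_systemd_escape; infer_instance
def pvWitness_systemd_escape : String := "/home/x.d"

def Spec_systemd_escape (path : String) (out : String) : Prop := out = systemd_escape_alt path
instance (path : String) (out : String) : Decidable (Spec_systemd_escape path out) := by unfold Spec_systemd_escape; infer_instance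

-- ===== CLAIM (what is proved, stated in full; the proofs are below) =====
def Claim_equal_systemd_escape : Prop := ∀ (path : String), Dom_systemd_escape path → Pre_systemd_escape path → Spec_systemd_escape path (systemd_escape path)

-- ===== LEMMAS AND PROOFS =====

-- B's per-character piece: what escComponent contributes for one char
def escPiece (c : Char) : List Char := if pvSafe.contains c then [c] else pvHex c

theorem flatMap_escPiece_safe (cs : List Char)
    (h : ∀ c ∈ cs, pvSafe.contains c = true) : cs.flatMap escPiece = cs := by
  induction cs with
  | nil => simp
  | cons c cs ih =>
    have hm : c ∈ pvSafe := by simpa using h c (by simp)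
    simp [escPiece, hm, ih (fun x hx => h x (by simp [hx]))]

-- head of a non-nil dropWhile fails the predicate (stated over our concrete lambda-free shape)
theorem dropWhile_head_false {p : Char → Bool} :
    ∀ {cs : List Char} {c : Char} {rest : List Char},
      cs.dropWhile p = c :: rest → p c = false := by
  intro cs
  induction cs with
  | nil => intro c rest h; cases h
  | cons x xs ih =>
    intro c rest h
    rw [List.dropWhile_cons] at h
    split at h
    · exact ih h
    · next hx =>
      injection h with h1 _
      subst h1
      simpa using hx

theorem escComponent_eq_nil {cs : List Char}
    (h : cs.dropWhile (fun c => pvSafe.contains c) = []) :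
    escComponent cs = cs.takeWhile (fun c => pvSafe.contains c) := by
  rw [escComponent]
  split
  · rfl
  · next c rest heq => rw [h] at heq; cases heq

theorem escComponent_eq_cons {cs : List Char} {c : Char} {rest : List Char}
    (h : cs.dropWhile (fun c => pvSafe.contains c) = c :: rest) :
    escComponent cs
      = cs.takeWhile (fun c => pvSafe.contains c) ++ pvHex c ++ escComponent rest := by
  rw [escComponent]
  split
  · next heq => rw [h] at heq; cases heq
  · next c' rest' heq =>
    rw [h] at heq
    injection heq with h1 h2
    rw [h1, h2]

theorem escComponent_eq_flatMap (cs : List Char) :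
    escComponent cs = cs.flatMap escPiece := by
  induction cs using escComponent.induct with
  | case1 cs hdrop =>
    have hall : ∀ c ∈ cs, pvSafe.contains c = true := List.dropWhile_eq_nil_iff.mp hdrop
    have hcs : cs.takeWhile (fun c => pvSafe.contains c) = cs := by
      conv_rhs => rw [← List.takeWhile_append_dropWhile
        (p := fun c => pvSafe.contains c) (l := cs), hdrop]
      rw [List.append_nil]
    rw [escComponent_eq_nil hdrop, flatMap_escPiece_safe cs hall, hcs]
  | case2 cs c rest hdrop ih =>
    have hc : pvSafe.contains c = false := dropWhile_head_false hdrop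
    have hcm : c ∉ pvSafe := by simpa using hc
    have hep : escPiece c = pvHex c := by simp [escPiece, hcm]
    have hpre : ∀ x ∈ cs.takeWhile (fun c => pvSafe.contains c),
        pvSafe.contains x = true := fun x hx => List.mem_takeWhile_imp hx
    have hsplit : cs = cs.takeWhile (fun c => pvSafe.contains c) ++ c :: rest := by
      conv_lhs => rw [← List.takeWhile_append_dropWhile
        (p := fun c => pvSafe.contains c) (l := cs), hdrop]
    conv_rhs => rw [hsplit]
    rw [escComponent_eq_cons hdrop, ih, List.flatMap_append, List.flatMap_cons,
      flatMap_escPiece_safe _ hpre, hep, List.append_assoc]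

theorem splitSep_ne_nil (cs : List Char) : pySplitSep cs ≠ [] := by
  induction cs with
  | nil => simp [pySplitSep]
  | cons c cs ih =>
    rw [pySplitSep]
    split
    · simp
    · cases hS : pySplitSep cs <;> simp

set_option maxRecDepth 20000 in
theorem escPiece_eq_aux :
    ∀ n ∈ List.range 128, n ≠ 47 →
      escPiece (Char.ofNat n) = systemd_escape_char (Char.ofNat n) := by
  decide

theorem escPiece_eq (c : Char) (h128 : c.toNat < 128) (h : c ≠ '/') :
    escPiece c = systemd_escape_char c := by
  have hn : c.toNat ≠ 47 := by
    intro hc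
    apply h
    have : c = Char.ofNat 47 := by rw [← hc, Char.ofNat_toNat]
    exact this
  have := escPiece_eq_aux c.toNat (List.mem_range.mpr h128) hn
  simpa [Char.ofNat_toNat] using this

theorem intercalate_cons₂ (sep a b : List Char) (t : List (List Char)) :
    List.intercalate sep (a :: b :: t) = a ++ sep ++ List.intercalate sep (b :: t) := by
  simp [List.intercalate, List.intersperse]

theorem intercalate_append_head (sep x y : List Char) (t : List (List Char)) :
    List.intercalate sep ((x ++ y) :: t) = x ++ List.intercalate sep (y :: t) := by
  cases t with
  | nil => simp [List.intercalate, List.intersperse]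
  | cons z t => simp [intercalate_cons₂, List.append_assoc]

theorem intercalate_flat (cs : List Char) (h : ∀ c ∈ cs, c.toNat < 128) :
    List.intercalate ['-'] ((pySplitSep cs).map escComponent)
      = cs.flatMap systemd_escape_char := by
  induction cs with
  | nil =>
    simp [pySplitSep, List.intercalate, escComponent_eq_flatMap]
  | cons c cs ih =>
    have htail : ∀ x ∈ cs, x.toNat < 128 := fun x hx => h x (by simp [hx])
    have ih' := ih htail
    by_cases hc : c = '/'
    · cases hS : pySplitSep cs with
      | nil => exact absurd hS (splitSep_ne_nil cs)
      | cons x t =>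
        rw [pySplitSep, if_pos hc, hS]
        rw [hS] at ih'
        have hesc : systemd_escape_char c = ['-'] := by
          rw [hc]; rfl
        simp only [List.map_cons, List.flatMap_cons, hesc]
        rw [escComponent_eq_flatMap, List.flatMap_nil, intercalate_cons₂]
        rw [List.map_cons] at ih'
        simpa using ih' 
    · cases hS : pySplitSep cs with
      | nil => exact absurd hS (splitSep_ne_nil cs)
      | cons x t =>
        rw [pySplitSep, if_neg hc, hS]
        rw [hS] at ih'
        simp only [List.map_cons, List.flatMap_cons]
        rw [escComponent_eq_flatMap, List.flatMap_cons, ← escComponent_eq_flatMap,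
          ← escPiece_eq c (h c (by simp)) hc, intercalate_append_head]
        rw [List.map_cons] at ih'
        simpa using ih' 

theorem mem_stripChars {c : Char} {cs t : List Char}
    (h : c ∈ PySem.Chars.stripChars cs t) : c ∈ cs := by
  simp only [PySem.Chars.stripChars] at h
  have h1 := List.dropWhile_sublist (p := fun x => t.contains x)
      (l := (List.dropWhile (fun x => t.contains x) cs).reverse)
  have h2 := List.dropWhile_sublist (p := fun x => t.contains x) (l := cs)
  have := (h1.subset (List.mem_reverse.mp h))
  exact h2.subset (List.mem_reverse.mp this)

-- ===== VERDICT (by name: the statement is the Claim_ definition above) =====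
theorem systemd_escape_spec : Claim_equal_systemd_escape := by
  intro path hdom hpre
  unfold Spec_systemd_escape systemd_escape systemd_escape_alt
  by_cases hs : path = "/"
  · simp [hs]
  · simp only [if_neg hs]
    set stripped := PySem.Chars.stripChars path.toList "/".toList with hstr
    have hchars : ∀ c ∈ stripped, c.toNat < 128 := by
      intro c hc
      have : pvDomChar c = true := by
        have := hdom
        unfold Dom_systemd_escape pvDomStr at this
        exact List.all_eq_true.mp this c (mem_stripChars hc)
      unfold pvDomChar at this
      simp only [Bool.or_eq_true, Bool.and_eq_true, decide_eq_true_eq, beq_iff_eq] at this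
      omega
    cases hget : PySem.List.pyGet? stripped 0 with
    | none => rfl
    | some c0 =>
      by_cases hdot : c0 = '.'
      · have hrest : ∀ c ∈ PySem.List.slice stripped (some 1) none, c.toNat < 128 := by
          intro c hc
          rw [PySem.List.slice_from stripped (by omega)] at hc
          exact hchars c (List.mem_of_mem_drop hc)
        simp [hdot, intercalate_flat _ hrest, List.flatMap_def]
      · simp [hdot, intercalate_flat _ hchars, List.flatMap_def]
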